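-- pv_equiv track=rewrite | github.com/dioptra-io/georesolver | georesolver/evaluation/evaluation_hostname_functions.py | parse_hostname_per_main_org
-- ===== SOURCE A (Python) =====
-- from collections import defaultdict
--
-- def parse_hostname_per_main_org(
--     hostname_per_main_org: list,
--     bgp_prefixes_per_hostname: dict,
--     bgp_prefix_threshold: int = 2,
-- ) -> dict:
--     """merge hosting organizations if they belong to the same company under different names"""
--
--     hostname_per_merged_main_orgs = defaultdict(list)
--     for main_org, hostnames in hostname_per_main_org:
--         for hostname in hostnames:
--             bgp_prefixes = bgp_prefixes_per_hostname[hostname]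
--
--             if len(bgp_prefixes) > bgp_prefix_threshold:
--
--                 if "AMAZON" in main_org:
--                     hostname_per_merged_main_orgs["AMAZON"].append(hostname)
--
--                 elif "GOOGLE" in main_org:
--                     hostname_per_merged_main_orgs["GOOGLE"].append(hostname)
--
--                 elif "AKAMAI" in main_org:
--                     hostname_per_merged_main_orgs["AKAMAI"].append(hostname)
--
--                 elif "APPLE" in main_org:
--                     hostname_per_merged_main_orgs["APPLE"].append(hostname)
--
--                 elif "MICROSOFT" in main_org:
--                     hostname_per_merged_main_orgs["MICROSOFT"].append(hostname)
--
--                 elif "TENCENT" in main_org: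
--                     hostname_per_merged_main_orgs["TENCENT"].append(hostname)
--
--                 elif "CHINANET" in main_org:
--                     hostname_per_merged_main_orgs["CHINANET"].append(hostname)
--
--                 elif "CMNET" in main_org:
--                     hostname_per_merged_main_orgs["CMNET"].append(hostname)
--
--                 else:
--                     hostname_per_merged_main_orgs[main_org].append(hostname)
--
--     return hostname_per_merged_main_orgs
-- ===== SOURCE B (Python) =====
-- CANON = ["AMAZON", "GOOGLE", "AKAMAI", "APPLE", "MICROSOFT", "TENCENT", "CHINANET", "CMNET"]
--
--
-- def _bucket(org):
--     for c in CANON: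
--         if c in org:
--             return c
--     return org
--
--
-- def parse_hostname_per_main_org(
--     hostname_per_main_org: list,
--     bgp_prefixes_per_hostname: dict,
--     bgp_prefix_threshold: int = 2,
-- ) -> dict:
--     """merge hosting organizations if they belong to the same company under different names"""
--     # stage 1: flatten to a (bucket, hostname) event list
--     events = [
--         (_bucket(org), h)
--         for org, hostnames in hostname_per_main_org
--         for h in hostnames
--         if len(bgp_prefixes_per_hostname[h]) > bgp_prefix_threshold
--     ]
--     # stage 2: bucket keys in first-appearance order
--     keys = list(dict.fromkeys(k for k, _ in events))
--     # stage 3: group by re-scanning the event list per key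
--     return {k: [h for k2, h in events if k2 == k] for k in keys}
-- ===== Notes on version B (the rewrite author's own statement) =====
-- stated objective: alternative
-- what changed: Replaces A's single-pass incremental defaultdict build with three staged passes: flatten input to a (bucket, hostname) event list using a canonical-keyword table instead of the elif chain, dedup the bucket keys in first-appearance order, then build each bucket's list by re-scanning the event list per key.
import Mathlib
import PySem

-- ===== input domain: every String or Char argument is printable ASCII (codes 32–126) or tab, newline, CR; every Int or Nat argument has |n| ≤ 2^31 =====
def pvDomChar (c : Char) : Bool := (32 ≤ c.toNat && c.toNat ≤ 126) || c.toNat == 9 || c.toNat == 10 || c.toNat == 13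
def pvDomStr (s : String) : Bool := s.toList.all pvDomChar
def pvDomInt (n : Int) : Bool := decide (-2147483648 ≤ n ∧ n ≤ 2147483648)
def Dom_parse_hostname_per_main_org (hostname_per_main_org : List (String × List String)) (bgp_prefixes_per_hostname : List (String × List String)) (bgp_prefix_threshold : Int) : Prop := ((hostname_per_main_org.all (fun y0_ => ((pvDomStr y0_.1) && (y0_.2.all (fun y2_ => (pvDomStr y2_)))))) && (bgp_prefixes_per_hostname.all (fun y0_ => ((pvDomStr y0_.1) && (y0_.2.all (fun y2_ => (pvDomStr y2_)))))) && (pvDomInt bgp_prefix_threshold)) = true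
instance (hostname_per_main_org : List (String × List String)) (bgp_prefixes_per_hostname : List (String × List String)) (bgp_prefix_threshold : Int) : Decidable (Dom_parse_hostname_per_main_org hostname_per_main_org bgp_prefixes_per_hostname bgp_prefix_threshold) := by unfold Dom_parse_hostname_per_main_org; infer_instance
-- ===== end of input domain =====

-- ===== PORT A =====
-- B replaces A's incremental defaultdict build by three staged passes: flatten to a
-- (bucket, hostname) event list, dedup the bucket keys, then group by re-scanning the
-- events per key (objective: alternative; same return value, different construction).
def parse_hostname_per_main_org (hostname_per_main_org : List (String × List String)) (bgp_prefixes_per_hostname : List (String × List String)) (bgp_prefix_threshold : Int) : List (String × List String) :=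
  (hostname_per_main_org.foldl (fun d p =>
    p.2.foldl (fun d hostname =>
      let bgp_prefixes := (PySem.Dict.mk bgp_prefixes_per_hostname).getD hostname []
      -- under Pre_ every hostname is a key, so getD never takes the default
      if (bgp_prefixes.length : Int) > bgp_prefix_threshold then
        if PySem.Str.isIn "AMAZON" p.1 then d.modify "AMAZON" [] (· ++ [hostname])
        else if PySem.Str.isIn "GOOGLE" p.1 then d.modify "GOOGLE" [] (· ++ [hostname])
        else if PySem.Str.isIn "AKAMAI" p.1 then d.modify "AKAMAI" [] (· ++ [hostname])
        else if PySem.Str.isIn "APPLE" p.1 then d.modify "APPLE" [] (· ++ [hostname])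
        else if PySem.Str.isIn "MICROSOFT" p.1 then d.modify "MICROSOFT" [] (· ++ [hostname])
        else if PySem.Str.isIn "TENCENT" p.1 then d.modify "TENCENT" [] (· ++ [hostname])
        else if PySem.Str.isIn "CHINANET" p.1 then d.modify "CHINANET" [] (· ++ [hostname])
        else if PySem.Str.isIn "CMNET" p.1 then d.modify "CMNET" [] (· ++ [hostname])
        else d.modify p.1 [] (· ++ [hostname])
      else d) d)
    (PySem.Dict.empty : PySem.Dict String (List String))).items

-- ===== PORT B =====
def pvCanon : List String := ["AMAZON", "GOOGLE", "AKAMAI", "APPLE", "MICROSOFT", "TENCENT", "CHINANET", "CMNET"]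

-- Source B's _bucket: first canonical keyword contained in org, else org itself
def pvBucketLoop : List String → String → String
  | [], org => org
  | c :: cs, org => if PySem.Str.isIn c org then c else pvBucketLoop cs org

def parse_hostname_per_main_org_alt (hostname_per_main_org : List (String × List String)) (bgp_prefixes_per_hostname : List (String × List String)) (bgp_prefix_threshold : Int) : List (String × List String) :=
  let events := hostname_per_main_org.flatMap (fun p =>
    (p.2.filter (fun h =>
      decide ((((PySem.Dict.mk bgp_prefixes_per_hostname).getD h []).length : Int) > bgp_prefix_threshold))).map
      (fun h => (pvBucketLoop pvCanon p.1, h)))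
  let keys := PySem.List.dedup (events.map (·.1))
  keys.map (fun k => (k, (events.filter (fun e => e.1 == k)).map (·.2)))

-- ===== PRECONDITION & SPEC =====
-- Pre_ excludes exactly the inputs on which Python A raises KeyError: some hostname is not a key
-- of bgp_prefixes_per_hostname.
def Pre_parse_hostname_per_main_org (hostname_per_main_org : List (String × List String)) (bgp_prefixes_per_hostname : List (String × List String)) (bgp_prefix_threshold : Int) : Prop :=
  (hostname_per_main_org.all (fun p => p.2.all (fun h => (PySem.Dict.mk bgp_prefixes_per_hostname).contains h))) = true
instance (hostname_per_main_org : List (String × List String)) (bgp_prefixes_per_hostname : List (String × List String)) (bgp_prefix_threshold : Int) : Decidable (Pre_parse_hostname_per_main_org hostname_per_main_org bgp_prefixes_per_hostname bgp_prefix_threshold) := by unfold Pre_parse_hostname_per_main_org; infer_instance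

def pvWitness_parse_hostname_per_main_org : (List (String × List String)) × (List (String × List String)) × Int :=
  ([("AMAZON-02", ["a.example"]), ("FOO", ["b.example"])],
   [("a.example", ["p1", "p2", "p3"]), ("b.example", ["p1"])], 2)

def Spec_parse_hostname_per_main_org (hostname_per_main_org : List (String × List String)) (bgp_prefixes_per_hostname : List (String × List String)) (bgp_prefix_threshold : Int) (out : List (String × List String)) : Prop := out = parse_hostname_per_main_org_alt hostname_per_main_org bgp_prefixes_per_hostname bgp_prefix_threshold
instance (hostname_per_main_org : List (String × List String)) (bgp_prefixes_per_hostname : List (String × List String)) (bgp_prefix_threshold : Int) (out : List (String × List String)) : Decidable (Spec_parse_hostname_per_main_org hostname_per_main_org bgp_prefixes_per_hostname bgp_prefix_threshold out) := by unfold Spec_parse_hostname_per_main_org; infer_instance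

-- ===== CLAIM (what is proved, stated in full; the proofs are below) =====
def Claim_equal_parse_hostname_per_main_org : Prop := ∀ (hostname_per_main_org : List (String × List String)) (bgp_prefixes_per_hostname : List (String × List String)) (bgp_prefix_threshold : Int), Dom_parse_hostname_per_main_org hostname_per_main_org bgp_prefixes_per_hostname bgp_prefix_threshold → Pre_parse_hostname_per_main_org hostname_per_main_org bgp_prefixes_per_hostname bgp_prefix_threshold → Spec_parse_hostname_per_main_org hostname_per_main_org bgp_prefixes_per_hostname bgp_prefix_threshold (parse_hostname_per_main_org hostname_per_main_org bgp_prefixes_per_hostname bgp_prefix_threshold)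

-- ===== LEMMAS AND PROOFS =====

-- A's eight-branch elif chain picks exactly the first canonical keyword contained in the
-- organization name (or the name itself), i.e. B's _bucket loop.
theorem pv_chain_eq (org : String) (d : PySem.Dict String (List String)) (h : String) :
    (if PySem.Str.isIn "AMAZON" org then d.modify "AMAZON" [] (· ++ [h])
     else if PySem.Str.isIn "GOOGLE" org then d.modify "GOOGLE" [] (· ++ [h])
     else if PySem.Str.isIn "AKAMAI" org then d.modify "AKAMAI" [] (· ++ [h])
     else if PySem.Str.isIn "APPLE" org then d.modify "APPLE" [] (· ++ [h])
     else if PySem.Str.isIn "MICROSOFT" org then d.modify "MICROSOFT" [] (· ++ [h])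
     else if PySem.Str.isIn "TENCENT" org then d.modify "TENCENT" [] (· ++ [h])
     else if PySem.Str.isIn "CHINANET" org then d.modify "CHINANET" [] (· ++ [h])
     else if PySem.Str.isIn "CMNET" org then d.modify "CMNET" [] (· ++ [h])
     else d.modify org [] (· ++ [h]))
    = d.modify (pvBucketLoop pvCanon org) [] (· ++ [h]) := by
  simp only [pvCanon, pvBucketLoop]
  split_ifs <;> simp_all

-- A's whole nested loop is the single event-list fold
theorem pv_a_fold_eq (H B_ : List (String × List String)) (t : Int) :
    H.foldl (fun d p =>
      p.2.foldl (fun d hostname =>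
        let bgp_prefixes := (PySem.Dict.mk B_).getD hostname []
        if (bgp_prefixes.length : Int) > t then
          if PySem.Str.isIn "AMAZON" p.1 then d.modify "AMAZON" [] (· ++ [hostname])
          else if PySem.Str.isIn "GOOGLE" p.1 then d.modify "GOOGLE" [] (· ++ [hostname])
          else if PySem.Str.isIn "AKAMAI" p.1 then d.modify "AKAMAI" [] (· ++ [hostname])
          else if PySem.Str.isIn "APPLE" p.1 then d.modify "APPLE" [] (· ++ [hostname])
          else if PySem.Str.isIn "MICROSOFT" p.1 then d.modify "MICROSOFT" [] (· ++ [hostname])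
          else if PySem.Str.isIn "TENCENT" p.1 then d.modify "TENCENT" [] (· ++ [hostname])
          else if PySem.Str.isIn "CHINANET" p.1 then d.modify "CHINANET" [] (· ++ [hostname])
          else if PySem.Str.isIn "CMNET" p.1 then d.modify "CMNET" [] (· ++ [hostname])
          else d.modify p.1 [] (· ++ [hostname])
        else d) d)
      (PySem.Dict.empty : PySem.Dict String (List String))
    = (H.flatMap (fun p =>
        (p.2.filter (fun h =>
          decide ((((PySem.Dict.mk B_).getD h []).length : Int) > t))).map
          (fun h => (pvBucketLoop pvCanon p.1, h)))).foldl
        (fun d e => d.modify e.1 [] (· ++ [e.2])) PySem.Dict.empty := by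
  rw [List.foldl_flatMap]
  apply PySem.List.foldl_congr_mem
  intro d p _
  rw [List.foldl_map, List.foldl_filter]
  apply PySem.List.foldl_congr_mem
  intro d' h _
  simp only [decide_eq_true_eq]
  by_cases hc : (((PySem.Dict.mk B_).getD h []).length : Int) > t
  · simp only [hc, if_pos]
    exact pv_chain_eq p.1 d' h
  · simp [hc]

-- the items of the event-list fold are exactly B's grouped list
theorem pv_group (events : List (String × String)) :
    (events.foldl (fun d e => d.modify e.1 [] (· ++ [e.2]))
      (PySem.Dict.empty : PySem.Dict String (List String))).items
    = (PySem.List.dedup (events.map (·.1))).map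
        (fun k => (k, (events.filter (fun e => e.1 == k)).map (·.2))) := by
  have hnd : (events.foldl (fun d e => d.modify e.1 [] (· ++ [e.2]))
      (PySem.Dict.empty : PySem.Dict String (List String))).keys.Nodup := by
    exact PySem.Dict.nodup_keys_foldl_modify_key events (·.1) [] (fun _ e => (· ++ [e.2])) _
      PySem.Dict.nodup_keys_empty
  rw [PySem.Dict.items_eq_map_keys _ hnd []]
  have hkeys : (events.foldl (fun d e => d.modify e.1 [] (· ++ [e.2]))
      (PySem.Dict.empty : PySem.Dict String (List String))).keys
      = PySem.List.dedup (events.map (·.1)) := by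
    rw [PySem.Dict.keys_foldl_modify_key events (·.1) [] (fun _ e => (· ++ [e.2]))]
    simp only [PySem.Dict.keys_empty, PySem.List.dedup_eq_ofList]
    exact PySem.Set.update_empty _
  rw [hkeys]
  apply List.map_congr_left
  intro k _
  rw [PySem.Dict.getD_foldl_modify_append, PySem.Dict.getD_empty]
  simp

theorem parse_hostname_per_main_org_eq_alt (hostname_per_main_org : List (String × List String)) (bgp_prefixes_per_hostname : List (String × List String)) (bgp_prefix_threshold : Int) :
    parse_hostname_per_main_org hostname_per_main_org bgp_prefixes_per_hostname bgp_prefix_threshold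
    = parse_hostname_per_main_org_alt hostname_per_main_org bgp_prefixes_per_hostname bgp_prefix_threshold := by
  unfold parse_hostname_per_main_org parse_hostname_per_main_org_alt
  rw [pv_a_fold_eq, pv_group]

-- ===== VERDICT (by name: the statement is the Claim_ definition above) =====
theorem parse_hostname_per_main_org_spec : Claim_equal_parse_hostname_per_main_org := by
  intro H B t _ _
  exact parse_hostname_per_main_org_eq_alt H B t
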